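-- pv_equiv track=rewrite | github.com/muzzy292/harness-racing | src/harness_model/track_pars.py | _nr_to_grade_band
-- ===== SOURCE A (Python) =====
-- _GRADE_BANDS = [
--     (0,   45,  "<=45"),
--     (46,  49,  "46-49"),
--     (50,  55,  "50-55"),
--     (56,  63,  "56-63"),
--     (64,  70,  "64-70"),
--     (71,  80,  "71-80"),
--     (81,  90,  "81-90"),
--     (91,  95,  "91-95"),
--     (96,  999, "96+"),
-- ]
--
-- def _nr_to_grade_band(nr_ceiling: int | float | None) -> str | None:
--     if nr_ceiling is None:
--         return None
--     nr = int(nr_ceiling)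
--     for lo, hi, key in _GRADE_BANDS:
--         if lo <= nr <= hi:
--             return key
--     return None
-- ===== SOURCE B (Python) =====
-- _UPPERS = [45, 49, 55, 63, 70, 80, 90, 95, 999]
-- _LABELS = ["<=45", "46-49", "50-55", "56-63", "64-70", "71-80", "81-90", "91-95", "96+"]
--
-- def _nr_to_grade_band(nr_ceiling):
--     if nr_ceiling is None:
--         return None
--     nr = int(nr_ceiling)
--     if nr < 0 or nr > 999:
--         return None
--     lo, hi = 0, len(_UPPERS)
--     while lo < hi:  # binary search: first index with _UPPERS[i] >= nr
--         mid = (lo + hi) // 2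
--         if _UPPERS[mid] < nr:
--             lo = mid + 1
--         else:
--             hi = mid
--     return _LABELS[lo]
-- ===== Notes on version B (the rewrite author's own statement) =====
-- stated objective: alternative
-- what changed: Replaces the linear scan over the (lo,hi,label) band table with a hand-written binary search (bisect_left) over the sorted band upper bounds, after an explicit range guard.
import Mathlib
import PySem

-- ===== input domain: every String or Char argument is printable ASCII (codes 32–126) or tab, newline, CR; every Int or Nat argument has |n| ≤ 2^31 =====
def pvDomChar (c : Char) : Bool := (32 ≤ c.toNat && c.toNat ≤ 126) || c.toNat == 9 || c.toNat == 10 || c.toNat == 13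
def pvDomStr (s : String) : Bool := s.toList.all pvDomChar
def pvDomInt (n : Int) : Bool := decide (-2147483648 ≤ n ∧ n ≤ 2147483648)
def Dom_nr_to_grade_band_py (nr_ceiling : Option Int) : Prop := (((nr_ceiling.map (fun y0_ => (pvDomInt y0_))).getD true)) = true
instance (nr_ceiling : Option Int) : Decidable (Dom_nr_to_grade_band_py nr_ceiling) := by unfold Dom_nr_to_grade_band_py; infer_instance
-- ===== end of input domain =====

-- B replaces the linear band-table scan with a binary search over sorted upper bounds (alternative algorithm).

-- ===== PORT A =====
-- the module constant _GRADE_BANDS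
def pvGradeBands : List (Int × Int × String) :=
  [(0, 45, "<=45"), (46, 49, "46-49"), (50, 55, "50-55"), (56, 63, "56-63"),
   (64, 70, "64-70"), (71, 80, "71-80"), (81, 90, "81-90"), (91, 95, "91-95"),
   (96, 999, "96+")]

-- the 'for lo, hi, key in _GRADE_BANDS' loop with its early return
def pvFindBand (nr : Int) : List (Int × Int × String) → Option String
  | [] => none
  | (lo, hi, key) :: rest => if lo ≤ nr ∧ nr ≤ hi then some key else pvFindBand nr rest

def nr_to_grade_band_py (nr_ceiling : Option Int) : Option String :=
  match nr_ceiling with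
  | none => none
  | some nr => pvFindBand nr pvGradeBands   -- int(nr_ceiling) is the identity on int input

-- ===== PORT B =====
def pvUppers : List Int := [45, 49, 55, 63, 70, 80, 90, 95, 999]
def pvLabels : List String := ["<=45", "46-49", "50-55", "56-63", "64-70", "71-80", "81-90", "91-95", "96+"]

-- the 'while lo < hi' binary-search loop of Source B (indices always in range, so getD is exact)
def pvBisect (nr : Int) (lo hi : Nat) : Nat :=
  if lo < hi then
    let mid := (lo + hi) / 2
    if pvUppers.getD mid 0 < nr then pvBisect nr (mid + 1) hi else pvBisect nr lo mid
  else lo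
termination_by hi - lo
decreasing_by all_goals omega

def nr_to_grade_band_py_alt (nr_ceiling : Option Int) : Option String :=
  match nr_ceiling with
  | none => none
  | some nr =>
    if nr < 0 ∨ 999 < nr then none
    else pvLabels.getD (pvBisect nr 0 pvUppers.length) ""

-- ===== PRECONDITION & SPEC =====
def Spec_nr_to_grade_band_py (nr_ceiling : Option Int) (out : Option String) : Prop := out = nr_to_grade_band_py_alt nr_ceiling
instance (nr_ceiling : Option Int) (out : Option String) : Decidable (Spec_nr_to_grade_band_py nr_ceiling out) := by unfold Spec_nr_to_grade_band_py; infer_instance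

-- ===== CLAIM (what is proved, stated in full; the proofs are below) =====
def Claim_equal_nr_to_grade_band_py : Prop := ∀ (nr_ceiling : Option Int), Dom_nr_to_grade_band_py nr_ceiling → Spec_nr_to_grade_band_py nr_ceiling (nr_to_grade_band_py nr_ceiling)

-- ===== LEMMAS AND PROOFS =====
theorem pv_main (nr : Int) : pvFindBand nr pvGradeBands = nr_to_grade_band_py_alt (some nr) := by
  by_cases h0 : nr < 0
  · simp [pvGradeBands, pvFindBand, nr_to_grade_band_py_alt, show (nr < 0 ∨ 999 < nr) from Or.inl h0, show ¬ ((0:Int) ≤ nr ∧ nr ≤ 45) from by omega, show ¬ ((46:Int) ≤ nr ∧ nr ≤ 49) from by omega, show ¬ ((50:Int) ≤ nr ∧ nr ≤ 55) from by omega, show ¬ ((56:Int) ≤ nr ∧ nr ≤ 63) from by omega, show ¬ ((64:Int) ≤ nr ∧ nr ≤ 70) from by omega, show ¬ ((71:Int) ≤ nr ∧ nr ≤ 80) from by omega, show ¬ ((81:Int) ≤ nr ∧ nr ≤ 90) from by omega, show ¬ ((91:Int) ≤ nr ∧ nr ≤ 95) from by omega, show ¬ ((96:Int) ≤ nr ∧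 nr ≤ 999) from by omega]
  by_cases h999 : 999 < nr
  · simp [pvGradeBands, pvFindBand, nr_to_grade_band_py_alt, show (nr < 0 ∨ 999 < nr) from Or.inr h999, show ¬ ((0:Int) ≤ nr ∧ nr ≤ 45) from by omega, show ¬ ((46:Int) ≤ nr ∧ nr ≤ 49) from by omega, show ¬ ((50:Int) ≤ nr ∧ nr ≤ 55) from by omega, show ¬ ((56:Int) ≤ nr ∧ nr ≤ 63) from by omega, show ¬ ((64:Int) ≤ nr ∧ nr ≤ 70) from by omega, show ¬ ((71:Int) ≤ nr ∧ nr ≤ 80) from by omega, show ¬ ((81:Int) ≤ nr ∧ nr ≤ 90) from by omega, show ¬ ((91:Int) ≤ nr ∧ nr ≤ 95) from by omega, show ¬ ((96:Int) ≤ nr ∧ nr ≤ 999) from by omega]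
  have step : ∀ (lo hi : Nat), lo < hi →
      pvBisect nr lo hi = if pvUppers.getD ((lo + hi) / 2) 0 < nr
        then pvBisect nr ((lo + hi) / 2 + 1) hi else pvBisect nr lo ((lo + hi) / 2) := by
    intro lo hi h
    rw [pvBisect]
    simp [h]
  have base : ∀ lo : Nat, pvBisect nr lo lo = lo := by
    intro lo; rw [pvBisect]; simp
  by_cases h45 : nr ≤ 45
  · simp [pvGradeBands, pvFindBand, nr_to_grade_band_py_alt, pvUppers, pvLabels,
      show ((0:Int) ≤ nr ∧ nr ≤ 45) from by omega,
      show ¬ (nr < 0 ∨ 999 < nr) from by omega,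
      step 0 9 (by omega),
      show ¬ ((70:Int) < nr) from by omega,
      step 0 4 (by omega),
      show ¬ ((55:Int) < nr) from by omega,
      step 0 2 (by omega),
      show ¬ ((49:Int) < nr) from by omega,
      step 0 1 (by omega),
      show ¬ ((45:Int) < nr) from by omega,
      base]
  by_cases h49 : nr ≤ 49
  · simp [pvGradeBands, pvFindBand, nr_to_grade_band_py_alt, pvUppers, pvLabels,
      show ¬ ((0:Int) ≤ nr ∧ nr ≤ 45) from by omega,
      show ((46:Int) ≤ nr ∧ nr ≤ 49) from by omega,
      show ¬ (nr < 0 ∨ 999 < nr) from by omega,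
      step 0 9 (by omega),
      show ¬ ((70:Int) < nr) from by omega,
      step 0 4 (by omega),
      show ¬ ((55:Int) < nr) from by omega,
      step 0 2 (by omega),
      show ¬ ((49:Int) < nr) from by omega,
      step 0 1 (by omega),
      show ((45:Int) < nr) from by omega,
      base]
  by_cases h55 : nr ≤ 55
  · simp [pvGradeBands, pvFindBand, nr_to_grade_band_py_alt, pvUppers, pvLabels,
      show ¬ ((0:Int) ≤ nr ∧ nr ≤ 45) from by omega,
      show ¬ ((46:Int) ≤ nr ∧ nr ≤ 49) from by omega,
      show ((50:Int) ≤ nr ∧ nr ≤ 55) from by omega,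
      show ¬ (nr < 0 ∨ 999 < nr) from by omega,
      step 0 9 (by omega),
      show ¬ ((70:Int) < nr) from by omega,
      step 0 4 (by omega),
      show ¬ ((55:Int) < nr) from by omega,
      step 0 2 (by omega),
      show ((49:Int) < nr) from by omega,
      base]
  by_cases h63 : nr ≤ 63
  · simp [pvGradeBands, pvFindBand, nr_to_grade_band_py_alt, pvUppers, pvLabels,
      show ¬ ((0:Int) ≤ nr ∧ nr ≤ 45) from by omega,
      show ¬ ((46:Int) ≤ nr ∧ nr ≤ 49) from by omega,
      show ¬ ((50:Int) ≤ nr ∧ nr ≤ 55) from by omega,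
      show ((56:Int) ≤ nr ∧ nr ≤ 63) from by omega,
      show ¬ (nr < 0 ∨ 999 < nr) from by omega,
      step 0 9 (by omega),
      show ¬ ((70:Int) < nr) from by omega,
      step 0 4 (by omega),
      show ((55:Int) < nr) from by omega,
      step 3 4 (by omega),
      show ¬ ((63:Int) < nr) from by omega,
      base]
  by_cases h70 : nr ≤ 70
  · simp [pvGradeBands, pvFindBand, nr_to_grade_band_py_alt, pvUppers, pvLabels,
      show ¬ ((0:Int) ≤ nr ∧ nr ≤ 45) from by omega,
      show ¬ ((46:Int) ≤ nr ∧ nr ≤ 49) from by omega,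
      show ¬ ((50:Int) ≤ nr ∧ nr ≤ 55) from by omega,
      show ¬ ((56:Int) ≤ nr ∧ nr ≤ 63) from by omega,
      show ((64:Int) ≤ nr ∧ nr ≤ 70) from by omega,
      show ¬ (nr < 0 ∨ 999 < nr) from by omega,
      step 0 9 (by omega),
      show ¬ ((70:Int) < nr) from by omega,
      step 0 4 (by omega),
      show ((55:Int) < nr) from by omega,
      step 3 4 (by omega),
      show ((63:Int) < nr) from by omega,
      base]
  by_cases h80 : nr ≤ 80
  · simp [pvGradeBands, pvFindBand, nr_to_grade_band_py_alt, pvUppers, pvLabels,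
      show ¬ ((0:Int) ≤ nr ∧ nr ≤ 45) from by omega,
      show ¬ ((46:Int) ≤ nr ∧ nr ≤ 49) from by omega,
      show ¬ ((50:Int) ≤ nr ∧ nr ≤ 55) from by omega,
      show ¬ ((56:Int) ≤ nr ∧ nr ≤ 63) from by omega,
      show ¬ ((64:Int) ≤ nr ∧ nr ≤ 70) from by omega,
      show ((71:Int) ≤ nr ∧ nr ≤ 80) from by omega,
      show ¬ (nr < 0 ∨ 999 < nr) from by omega,
      step 0 9 (by omega),
      show ((70:Int) < nr) from by omega,
      step 5 9 (by omega),
      show ¬ ((95:Int) < nr) from by omega,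
      step 5 7 (by omega),
      show ¬ ((90:Int) < nr) from by omega,
      step 5 6 (by omega),
      show ¬ ((80:Int) < nr) from by omega,
      base]
  by_cases h90 : nr ≤ 90
  · simp [pvGradeBands, pvFindBand, nr_to_grade_band_py_alt, pvUppers, pvLabels,
      show ¬ ((0:Int) ≤ nr ∧ nr ≤ 45) from by omega,
      show ¬ ((46:Int) ≤ nr ∧ nr ≤ 49) from by omega,
      show ¬ ((50:Int) ≤ nr ∧ nr ≤ 55) from by omega,
      show ¬ ((56:Int) ≤ nr ∧ nr ≤ 63) from by omega,
      show ¬ ((64:Int) ≤ nr ∧ nr ≤ 70) from by omega,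
      show ¬ ((71:Int) ≤ nr ∧ nr ≤ 80) from by omega,
      show ((81:Int) ≤ nr ∧ nr ≤ 90) from by omega,
      show ¬ (nr < 0 ∨ 999 < nr) from by omega,
      step 0 9 (by omega),
      show ((70:Int) < nr) from by omega,
      step 5 9 (by omega),
      show ¬ ((95:Int) < nr) from by omega,
      step 5 7 (by omega),
      show ¬ ((90:Int) < nr) from by omega,
      step 5 6 (by omega),
      show ((80:Int) < nr) from by omega,
      base]
  by_cases h95 : nr ≤ 95
  · simp [pvGradeBands, pvFindBand, nr_to_grade_band_py_alt, pvUppers, pvLabels,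
      show ¬ ((0:Int) ≤ nr ∧ nr ≤ 45) from by omega,
      show ¬ ((46:Int) ≤ nr ∧ nr ≤ 49) from by omega,
      show ¬ ((50:Int) ≤ nr ∧ nr ≤ 55) from by omega,
      show ¬ ((56:Int) ≤ nr ∧ nr ≤ 63) from by omega,
      show ¬ ((64:Int) ≤ nr ∧ nr ≤ 70) from by omega,
      show ¬ ((71:Int) ≤ nr ∧ nr ≤ 80) from by omega,
      show ¬ ((81:Int) ≤ nr ∧ nr ≤ 90) from by omega,
      show ((91:Int) ≤ nr ∧ nr ≤ 95) from by omega,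
      show ¬ (nr < 0 ∨ 999 < nr) from by omega,
      step 0 9 (by omega),
      show ((70:Int) < nr) from by omega,
      step 5 9 (by omega),
      show ¬ ((95:Int) < nr) from by omega,
      step 5 7 (by omega),
      show ((90:Int) < nr) from by omega,
      base]
  · simp [pvGradeBands, pvFindBand, nr_to_grade_band_py_alt, pvUppers, pvLabels,
      show ¬ ((0:Int) ≤ nr ∧ nr ≤ 45) from by omega,
      show ¬ ((46:Int) ≤ nr ∧ nr ≤ 49) from by omega,
      show ¬ ((50:Int) ≤ nr ∧ nr ≤ 55) from by omega,
      show ¬ ((56:Int) ≤ nr ∧ nr ≤ 63) from by omega,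
      show ¬ ((64:Int) ≤ nr ∧ nr ≤ 70) from by omega,
      show ¬ ((71:Int) ≤ nr ∧ nr ≤ 80) from by omega,
      show ¬ ((81:Int) ≤ nr ∧ nr ≤ 90) from by omega,
      show ¬ ((91:Int) ≤ nr ∧ nr ≤ 95) from by omega,
      show ((96:Int) ≤ nr ∧ nr ≤ 999) from by omega,
      show ¬ (nr < 0 ∨ 999 < nr) from by omega,
      step 0 9 (by omega),
      show ((70:Int) < nr) from by omega,
      step 5 9 (by omega),
      show ((95:Int) < nr) from by omega,
      step 8 9 (by omega),
      show ¬ ((999:Int) < nr) from by omega,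
      base]
    omega

-- ===== VERDICT (by name: the statement is the Claim_ definition above) =====
theorem nr_to_grade_band_py_spec : Claim_equal_nr_to_grade_band_py := by
  intro nr_ceiling _
  unfold Spec_nr_to_grade_band_py
  cases nr_ceiling with
  | none => rfl
  | some nr => exact pv_main nr
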